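-- pv_equiv track=rewrite | github.com/Meliowant/advent_of_code | year2020/day06/detect_yes_answers_2.py | extract_groups_unique_answers
-- ===== SOURCE A (Python) =====
-- def extract_groups_unique_answers(answers_list):
--     all_answers = []
--     for answer_group in answers_list:
--         ag = []
--         for answer in answer_group:
--             ag.extend(answer)
--         all_answers.append(set(ag))
--
--     if len(all_answers) == 0:
--         return set()
--     return set.intersection(*all_answers)
-- ===== SOURCE B (Python) =====
-- def extract_groups_unique_answers(answers_list):
--     n = len(answers_list)
--     counts = {}
--     for answer_group in answers_list:
--         for ch in dict.fromkeys(ch for answer in answer_group for ch in answer):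
--             counts[ch] = counts.get(ch, 0) + 1
--     return {ch for ch, c in counts.items() if c == n}
-- ===== Notes on version B (the rewrite author's own statement) =====
-- stated objective: alternative
-- what changed: B replaces building one set per group and folding set.intersection over them by a single tally: a dict counts, for each group, each distinct character once, and the result is the set of characters whose count equals the number of groups.
import Mathlib
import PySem

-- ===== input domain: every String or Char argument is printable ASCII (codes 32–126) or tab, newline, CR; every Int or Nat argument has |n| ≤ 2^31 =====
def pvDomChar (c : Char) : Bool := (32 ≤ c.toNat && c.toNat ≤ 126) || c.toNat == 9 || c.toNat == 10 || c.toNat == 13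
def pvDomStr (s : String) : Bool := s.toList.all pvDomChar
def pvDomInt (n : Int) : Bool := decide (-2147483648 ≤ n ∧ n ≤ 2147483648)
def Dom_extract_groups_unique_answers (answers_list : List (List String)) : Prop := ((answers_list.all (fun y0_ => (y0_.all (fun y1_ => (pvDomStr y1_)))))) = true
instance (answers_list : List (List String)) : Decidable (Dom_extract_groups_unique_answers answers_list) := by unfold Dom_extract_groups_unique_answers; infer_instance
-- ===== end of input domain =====

-- B tallies each group's distinct characters in one dict and keeps those counted in every group,
-- instead of building one set per group and folding set.intersection over them ('alternative').

-- ===== PORT A =====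
def extract_groups_unique_answers (answers_list : List (List String)) : List String :=
  let all_answers : List (List String) :=
    answers_list.foldl (fun all_answers answer_group =>
      let ag : List String :=
        answer_group.foldl (fun ag answer => ag ++ answer.toList.map (fun c => String.mk [c])) []
      all_answers ++ [PySem.Set.ofList ag]) []
  if all_answers.length == 0 then []
  else
    match all_answers with
    | [] => []
    | h :: t => t.foldl (fun s u => PySem.Set.inter s u) h

-- ===== PORT B =====
def extract_groups_unique_answers_alt (answers_list : List (List String)) : List String :=
  let n : Int := answers_list.length
  let counts : PySem.Dict String Int :=
    answers_list.foldl (fun counts answer_group =>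
      (PySem.List.dedup (answer_group.flatMap (fun answer => answer.toList.map (fun c => String.mk [c])))).foldl
        (fun counts ch => counts.insert ch (counts.getD ch 0 + 1)) counts) PySem.Dict.empty
  PySem.Set.ofList ((counts.items.filter (fun p => p.2 == n)).map (fun p => p.1))

-- ===== PRECONDITION & SPEC =====
def Spec_extract_groups_unique_answers (answers_list : List (List String)) (out : List String) : Prop := out = extract_groups_unique_answers_alt answers_list
instance (answers_list : List (List String)) (out : List String) : Decidable (Spec_extract_groups_unique_answers answers_list out) := by unfold Spec_extract_groups_unique_answers; infer_instance

-- ===== CLAIM (what is proved, stated in full; the proofs are below) =====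
def Claim_equal_extract_groups_unique_answers : Prop := ∀ (answers_list : List (List String)), Dom_extract_groups_unique_answers answers_list → Spec_extract_groups_unique_answers answers_list (extract_groups_unique_answers answers_list)

-- ===== LEMMAS AND PROOFS =====

/-- All characters of a group, as 1-char strings, in order. -/
def cof (g : List String) : List String := g.flatMap (fun answer => answer.toList.map (fun c => String.mk [c]))

/-- The flattened per-group dedup streams B counts over. -/
def Lstream (gs : List (List String)) : List String := gs.flatMap (fun g => PySem.List.dedup (cof g))

theorem ofList_of_nodup {α : Type} [BEq α] [LawfulBEq α] (xs : List α) (h : xs.Nodup) :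
    PySem.Set.ofList xs = xs := by
  rw [← PySem.Set.update_nil_left,
      PySem.Set.update_eq_append_of_disjoint _ _ h (by intro x _ hx; exact (List.not_mem_nil hx))]
  simp

theorem foldl_inter {α : Type} [BEq α] (ts : List (PySem.Set α)) (s : PySem.Set α) :
    ts.foldl (fun s u => PySem.Set.inter s u) s = s.filter (fun x => ts.all (fun t => t.contains x)) := by
  induction ts generalizing s with
  | nil => simp
  | cons t ts ih =>
      simp only [List.foldl_cons]
      rw [ih]
      simp only [PySem.Set.inter, List.filter_filter, List.all_cons]
      congr 1
      funext a
      rw [Bool.and_comm]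

theorem counts_foldl_eq_counter (gs : List (List String)) :
    gs.foldl (fun counts answer_group =>
      (PySem.List.dedup (answer_group.flatMap (fun answer => answer.toList.map (fun c => String.mk [c])))).foldl
        (fun counts ch => counts.insert ch (counts.getD ch 0 + 1)) counts) PySem.Dict.empty
    = PySem.Dict.counter (Lstream gs) := by
  rw [← PySem.Dict.foldl_insert_getD_add_one_eq_counter]
  suffices h : ∀ (d : PySem.Dict String Int),
      gs.foldl (fun counts answer_group =>
        (PySem.List.dedup (answer_group.flatMap (fun answer => answer.toList.map (fun c => String.mk [c])))).foldl
          (fun counts ch => counts.insert ch (counts.getD ch 0 + 1)) counts) d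
      = (Lstream gs).foldl (fun d x => d.insert x (d.getD x 0 + 1)) d by
    exact h _
  induction gs with
  | nil => intro d; simp [Lstream]
  | cons g gs ih =>
      intro d
      simp only [List.foldl_cons, Lstream, List.flatMap_cons, List.foldl_append]
      exact ih _

theorem count_Lstream (gs : List (List String)) (x : String) :
    (Lstream gs).count x = gs.countP (fun g => decide (x ∈ cof g)) := by
  induction gs with
  | nil => simp [Lstream]
  | cons g gs ih =>
      simp only [Lstream, List.flatMap_cons, List.count_append, List.countP_cons] at *
      rw [ih]
      by_cases hx : x ∈ cof g
      · rw [List.count_eq_one_of_mem (PySem.List.nodup_dedup _) (by rw [PySem.List.mem_dedup]; exact hx)]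
        simp [hx]; omega
      · rw [List.count_eq_zero_of_not_mem (by rw [PySem.List.mem_dedup]; exact hx)]
        simp [hx]

theorem B_closed (gs : List (List String)) :
    extract_groups_unique_answers_alt gs
      = (PySem.Set.ofList (Lstream gs)).filter
          (fun k => decide ((Lstream gs).count k = gs.length)) := by
  unfold extract_groups_unique_answers_alt
  simp only [counts_foldl_eq_counter, PySem.Dict.items_counter]
  rw [List.filter_map, List.map_map]
  have hfun : ((fun p => p.2 == (gs.length : Int)) ∘ fun k => (k, ((Lstream gs).count k : Int)))
      = fun k => decide ((Lstream gs).count k = gs.length) := by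
    funext k; rw [Function.comp_apply, Bool.eq_iff_iff]; simp
  rw [hfun]
  have : ((fun p => p.1) ∘ fun k : String => (k, ((Lstream gs).count k : Int))) = id := by
    funext k; rfl
  rw [this, List.map_id]
  exact ofList_of_nodup _ ((PySem.Set.nodup_ofList _).filter _)

theorem A_closed (g0 : List String) (rest : List (List String)) :
    extract_groups_unique_answers (g0 :: rest)
      = (PySem.Set.ofList (cof g0)).filter
          (fun x => rest.all (fun g => (PySem.Set.ofList (cof g)).contains x)) := by
  unfold extract_groups_unique_answers
  have hall : (g0 :: rest).foldl (fun all_answers answer_group =>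
      all_answers ++ [PySem.Set.ofList
        (answer_group.foldl (fun ag answer => ag ++ answer.toList.map (fun c => String.mk [c])) [])]) []
      = (g0 :: rest).map (fun g => PySem.Set.ofList (cof g)) := by
    rw [PySem.List.foldl_append_eq_flatMap]
    simp only [List.nil_append]
    have h1 : ∀ g : List String,
        (g.foldl (fun ag answer => ag ++ answer.toList.map (fun c => String.mk [c])) []) = cof g := by
      intro g; rw [PySem.List.foldl_append_eq_flatMap]; simp [cof]
    simp only [h1]
    induction (g0 :: rest) with
    | nil => rfl
    | cons a l ih => simp [ih]
  simp only [hall, List.map_cons, List.length_cons, beq_iff_eq, Nat.succ_ne_zero, if_false]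
  rw [foldl_inter]
  congr 1
  funext x
  rw [List.all_map]
  rfl

theorem Lstream_cons_split (g0 : List String) (rest : List (List String)) :
    PySem.Set.ofList (Lstream (g0 :: rest))
      = PySem.List.dedup (cof g0)
        ++ (PySem.Set.ofList (Lstream rest)).filter
             (fun y => !(PySem.List.dedup (cof g0) : PySem.Set String).contains y) := by
  have : Lstream (g0 :: rest) = PySem.List.dedup (cof g0) ++ Lstream rest := by
    simp [Lstream]
  rw [this, PySem.Set.ofList_append,
      ofList_of_nodup _ (PySem.List.nodup_dedup _),
      PySem.Set.update_eq_append_filter]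
  rfl

-- ===== VERDICT (by name: the statement is the Claim_ definition above) =====
theorem extract_groups_unique_answers_spec : Claim_equal_extract_groups_unique_answers := by
  intro gs _
  unfold Spec_extract_groups_unique_answers
  cases gs with
  | nil => rfl
  | cons g0 rest =>
      rw [A_closed, B_closed, Lstream_cons_split, List.filter_append]
      have hextra : ((PySem.Set.ofList (Lstream rest)).filter
          (fun y => !(PySem.List.dedup (cof g0) : PySem.Set String).contains y)).filter
          (fun k => decide ((Lstream (g0 :: rest)).count k = (g0 :: rest).length)) = [] := by
        rw [List.filter_eq_nil_iff]
        intro y hy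
        have hy0 : y ∉ cof g0 := by
          have h2 := (List.mem_filter.mp hy).2
          simp at h2
          exact h2
        have hle := List.countP_le_length (p := fun g => decide (y ∈ cof g)) (l := rest)
        rw [count_Lstream]
        simp [hy0]
        omega
      rw [hextra, List.append_nil]
      have hofl : PySem.List.dedup (cof g0) = PySem.Set.ofList (cof g0) :=
        PySem.List.dedup_eq_ofList _
      rw [hofl]
      apply List.filter_congr
      intro x hx
      have hx0 : x ∈ cof g0 := (PySem.Set.mem_ofList _ _).mp hx
      have hle := List.countP_le_length (p := fun g => decide (x ∈ cof g)) (l := rest)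
      rw [count_Lstream, Bool.eq_iff_iff]
      simp only [decide_eq_true_eq, List.all_eq_true, List.countP_cons,
        List.length_cons, hx0, decide_true, if_true, PySem.Set.contains_iff,
        PySem.Set.mem_ofList]
      constructor
      · intro h
        have heq : rest.countP (fun g => decide (x ∈ cof g)) = rest.length :=
          List.countP_eq_length.mpr (fun g hg => decide_eq_true_eq.mpr (h g hg))
        omega
      · intro h g hg
        have heq : rest.countP (fun g => decide (x ∈ cof g)) = rest.length := by omega
        exact decide_eq_true_eq.mp (List.countP_eq_length.mp heq g hg)
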